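-- pv_equiv track=rewrite | github.com/wurlinney/AISD | sem1/lab3/task4/task4.py | points_counter
-- ===== SOURCE A (Python) =====
-- def points_counter(p, sections, points):
--     section_info = []
--     counter = 0
--     result = [0] * p
--     for section in sections:
--         section_info.append([section[0], "start"])
--         section_info.append([section[1], "end"])
--     for i, point in enumerate(points):
--         section_info.append([point, "point", i])
--     section_info.sort(key=lambda x: (x[0], x[1] == "end", x[1] == "point"))
--     for element in section_info:
--         if element[1] == 'start':
--             counter += 1
--         elif element[1] == 'end':
--             counter -= 1
--         else:
--             result[element[2]] = counter
--     return result
-- ===== SOURCE B (Python) =====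
-- def points_counter(p, sections, points):
--     # For each point, count sections directly: #(start <= pt) - #(end < pt),
--     # then pad with zeros up to length p (A returns a length-p list).
--     result = []
--     for point in points:
--         le = 0
--         lt = 0
--         for a, b in sections:
--             if a <= point:
--                 le += 1
--             if b < point:
--                 lt += 1
--         result.append(le - lt)
--     return result + [0] * (p - len(points))
-- ===== Notes on version B (the rewrite author's own statement) =====
-- stated objective: simpler
-- what changed: Replaces A's build-events/sort/sweep-line pipeline by direct per-point counting: for each point, count sections with start <= point minus sections with end < point (which equals A's inclusive sweep counter, also for inverted sections), then pad with zeros to length p.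
import Mathlib
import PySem

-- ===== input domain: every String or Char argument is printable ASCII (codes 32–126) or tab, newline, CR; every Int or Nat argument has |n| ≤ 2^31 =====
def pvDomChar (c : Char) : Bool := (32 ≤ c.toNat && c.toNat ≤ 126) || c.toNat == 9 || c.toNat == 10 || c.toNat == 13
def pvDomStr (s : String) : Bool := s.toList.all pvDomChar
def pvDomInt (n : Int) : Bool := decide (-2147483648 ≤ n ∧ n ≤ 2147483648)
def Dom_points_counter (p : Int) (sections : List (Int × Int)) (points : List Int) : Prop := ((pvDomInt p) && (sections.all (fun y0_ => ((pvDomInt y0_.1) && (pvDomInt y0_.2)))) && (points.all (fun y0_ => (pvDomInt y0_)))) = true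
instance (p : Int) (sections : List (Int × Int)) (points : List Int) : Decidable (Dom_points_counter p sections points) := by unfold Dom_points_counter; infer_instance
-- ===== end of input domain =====

-- B replaces A's build-events/sort/sweep pipeline by direct per-point counting (#starts ≤ point − #ends < point, then zero-padding to length p); objective: simpler.

-- ===== PORT A =====
-- Python's sort key is the tuple (x[0], x[1]=="end", x[1]=="point"); sorted2 takes two keys, so the
-- Bool pair is encoded as the 2-bit number 2*b1+b2, an order isomorphism for the lexicographic order
-- on Bool × Bool ((F,F) < (F,T) < (T,F) < (T,T) ↔ 0 < 1 < 2 < 3); start/end events carry index 0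
-- (Python's 2-element event lists have no index; it is never read for them).
def points_counter (p : Int) (sections : List (Int × Int)) (points : List Int) : List Int :=
  let info0 : List (Int × String × Int) :=
    sections.foldl (fun acc s => acc ++ [(s.1, "start", 0), (s.2, "end", 0)]) []
  let info : List (Int × String × Int) :=
    info0 ++ (PySem.List.enumerate points).map (fun ip => (ip.2, "point", ip.1))
  let sortedInfo := PySem.List.sorted2 info (fun x => x.1)
      (fun x => 2 * (if x.2.1 == "end" then (1:Int) else 0) + (if x.2.1 == "point" then (1:Int) else 0))
  let st := sortedInfo.foldl (fun (cr : Int × List Int) e =>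
      if e.2.1 == "start" then (cr.1 + 1, cr.2)
      else if e.2.1 == "end" then (cr.1 - 1, cr.2)
      else (cr.1, PySem.List.pySetD cr.2 e.2.2 cr.1))
      (0, PySem.List.pyRepeat [(0:Int)] p)
  st.2

-- ===== PORT B =====
def points_counter_alt (p : Int) (sections : List (Int × Int)) (points : List Int) : List Int :=
  let result := points.foldl (fun res point =>
      let c := sections.foldl (fun (c : Int × Int) s =>
          ((if s.1 ≤ point then c.1 + 1 else c.1), (if s.2 < point then c.2 + 1 else c.2))) (0, 0)
      res ++ [c.1 - c.2]) []
  result ++ PySem.List.pyRepeat [(0:Int)] (p - points.length)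

-- ===== PRECONDITION & SPEC =====
-- Pre_ excludes exactly the inputs where A raises IndexError: len(points) > p with points nonempty
-- (result = [0]*p is too short for the point indices written into it).
def Pre_points_counter (p : Int) (sections : List (Int × Int)) (points : List Int) : Prop :=
  (points.length : Int) ≤ p ∨ points = []
instance (p : Int) (sections : List (Int × Int)) (points : List Int) : Decidable (Pre_points_counter p sections points) := by unfold Pre_points_counter; infer_instance

def pvWitness_points_counter : Int × (List (Int × Int)) × List Int := (2, [(0, 5)], [1, 3])

def Spec_points_counter (p : Int) (sections : List (Int × Int)) (points : List Int) (out : List Int) : Prop := out = points_counter_alt p sections points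
instance (p : Int) (sections : List (Int × Int)) (points : List Int) (out : List Int) : Decidable (Spec_points_counter p sections points out) := by unfold Spec_points_counter; infer_instance

-- ===== CLAIM (what is proved, stated in full; the proofs are below) =====
def Claim_equal_points_counter : Prop := ∀ (p : Int) (sections : List (Int × Int)) (points : List Int), Dom_points_counter p sections points → Pre_points_counter p sections points → Spec_points_counter p sections points (points_counter p sections points)


-- ===== LEMMAS AND PROOFS =====

-- the full (unsorted) event list, in flatMap form
def pvInfo (sections : List (Int × Int)) (points : List Int) : List (Int × String × Int) :=
  sections.flatMap (fun s => [(s.1, "start", 0), (s.2, "end", 0)])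
    ++ (PySem.List.enumerate points).map (fun ip => (ip.2, "point", ip.1))

-- the single Int key equal (on the events that occur) to Python's lexicographic tuple key
def pvTag (e : Int × String × Int) : Int :=
  2 * (if e.2.1 == "end" then (1:Int) else 0) + (if e.2.1 == "point" then (1:Int) else 0)
def pvKey (e : Int × String × Int) : Int := 3 * e.1 + pvTag e

def pvStep (cr : Int × List Int) (e : Int × String × Int) : Int × List Int :=
  if e.2.1 == "start" then (cr.1 + 1, cr.2)
  else if e.2.1 == "end" then (cr.1 - 1, cr.2)
  else (cr.1, PySem.List.pySetD cr.2 e.2.2 cr.1)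

def pvDelta (e : Int × String × Int) : Int :=
  if e.2.1 == "start" then 1 else if e.2.1 == "end" then -1 else 0


-- no start/end event matches a point predicate
lemma pv_flat_countP_zero (sections : List (Int × Int)) (j : Nat) :
    (sections.flatMap (fun s => [(s.1, ("start":String), (0:Int)), (s.2, "end", 0)])).countP
      (fun e => !(e.2.1 == "start") && !(e.2.1 == "end") && (e.2.2 == (j : Int))) = 0 := by
  induction sections with
  | nil => rfl
  | cons s l ih => simpa using ih

-- the enumerated points contain index t exactly once when 0 ≤ t < len
lemma pv_enum_countP (xs : List Int) (s t : Int) :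
    ((PySem.List.enumerate xs s).map (fun ip => (ip.2, ("point":String), ip.1))).countP
      (fun e => !(e.2.1 == "start") && !(e.2.1 == "end") && (e.2.2 == t))
      = if s ≤ t ∧ t < s + xs.length then 1 else 0 := by
  induction xs generalizing s with
  | nil => simp
  | cons x xs ih =>
      rw [PySem.List.enumerate_cons]
      simp only [List.map_cons, List.countP_cons, ih]
      simp only [List.length_cons]
      have hpred : (!((("point":String)) == "start") && !((("point":String)) == "end") && ((s:Int) == t)) = decide (s = t) := by
        by_cases h : s = t <;> simp [h]
      simp only [hpred, decide_eq_true_eq]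
      split_ifs <;> push_cast at * <;> omega

-- classification of the events of pvInfo
lemma pvInfo_mem_elim {sections : List (Int × Int)} {points : List Int}
    {e : Int × String × Int} (he : e ∈ pvInfo sections points) :
    (∃ s ∈ sections, e = (s.1, "start", 0) ∨ e = (s.2, "end", 0)) ∨
    (∃ k, ∃ (h : k < points.length), e = (points[k], "point", (k : Int))) := by
  unfold pvInfo at he
  rcases List.mem_append.mp he with h | h
  · left
    rcases List.mem_flatMap.mp h with ⟨s, hs, hm⟩
    exact ⟨s, hs, by simpa using hm⟩
  · right
    rcases List.mem_map.mp h with ⟨ip, hip, rfl⟩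
    rcases (PySem.List.mem_enumerate_iff points 0 ip).mp hip with ⟨k, hk, rfl⟩
    exact ⟨k, hk, by simp⟩

lemma pvPoint_mem_info {sections : List (Int × Int)} {points : List Int}
    {j : Nat} (hj : j < points.length) :
    (points[j], "point", (j : Int)) ∈ pvInfo sections points := by
  unfold pvInfo
  refine List.mem_append.mpr (Or.inr ?_)
  refine List.mem_map.mpr ⟨((j : Int), points[j]), ?_, rfl⟩
  exact (PySem.List.mem_enumerate_iff points 0 _).mpr ⟨j, hj, by simp⟩

-- the two tag booleans, read as a 2-bit number, are always in [0,2]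
lemma pvTag_bounds (e : Int × String × Int) : 0 ≤ pvTag e ∧ pvTag e ≤ 2 := by
  unfold pvTag
  by_cases h1 : (e.2.1 == "end") = true
  · have h2 : (e.2.1 == "point") = false := by
      simp only [beq_iff_eq] at h1 ⊢; simp [h1]
    simp [h1, h2]
  · simp only [Bool.not_eq_true] at h1
    by_cases h2 : (e.2.1 == "point") = true <;> simp [h1, h2] <;> omega

-- Python's lexicographic tuple comparison equals comparison of the single key pvKey
lemma pv_sorted2_eq_sorted (xs : List (Int × String × Int)) :
    PySem.List.sorted2 xs (fun x => x.1)
        (fun x => 2 * (if x.2.1 == "end" then (1:Int) else 0) + (if x.2.1 == "point" then (1:Int) else 0))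
      = PySem.List.sorted xs pvKey := by
  rw [PySem.List.sorted_eq_foldl_insertBy]
  simp only [PySem.List.sorted2, if_neg (by decide : ¬ (false = true))]
  congr 1
  funext acc x
  congr 1
  funext a b
  have ha := pvTag_bounds a
  have hb := pvTag_bounds b
  show (decide (a.1 < b.1) || (!decide (b.1 < a.1) && decide (pvTag a < pvTag b)))
      = decide (pvKey a < pvKey b)
  rw [← decide_not, ← Bool.decide_and, ← Bool.decide_or, decide_eq_decide]
  unfold pvKey
  omega

-- sweep counter = initial + sum of deltas
lemma pv_sweep_fst (l : List (Int × String × Int)) (c : Int) (r : List Int) :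
    (l.foldl pvStep (c, r)).1 = c + (l.map pvDelta).sum := by
  induction l generalizing c r with
  | nil => simp
  | cons e l ih =>
      simp only [List.foldl_cons, List.map_cons, List.sum_cons, pvStep, pvDelta]
      split_ifs <;> simp [pvStep] at ih ⊢ <;> rw [ih] <;> ring

lemma pv_sweep_length (l : List (Int × String × Int)) (c : Int) (r : List Int) :
    (l.foldl pvStep (c, r)).2.length = r.length := by
  induction l generalizing c r with
  | nil => rfl
  | cons e l ih =>
      simp only [List.foldl_cons, pvStep]
      split_ifs <;> simp [ih, PySem.List.length_pySetD]

-- an index never written keeps its value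
lemma pv_sweep_get_of_absent (l : List (Int × String × Int)) (c : Int) (r : List Int) (j : Nat)
    (h : ∀ e ∈ l, ¬(e.2.1 == "start") = true → ¬(e.2.1 == "end") = true →
          0 ≤ e.2.2 ∧ e.2.2 ≠ (j : Int)) :
    ((l.foldl pvStep (c, r)).2)[j]? = r[j]? := by
  induction l generalizing c r with
  | nil => rfl
  | cons e l ih =>
      simp only [List.foldl_cons, pvStep]
      split_ifs with h1 h2
      · exact ih _ _ (fun e he => h e (by simp [he]))
      · exact ih _ _ (fun e he => h e (by simp [he]))
      · rw [ih _ _ (fun e he => h e (by simp [he]))]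
        obtain ⟨hnn, hne⟩ := h e (by simp) (by simp [h1]) (by simp [h2])
        rw [PySem.List.pySetD_of_nonneg _ _ hnn]
        exact List.getElem?_set_ne (by omega)

-- the index written once gets the running counter at its event
lemma pv_sweep_get_of_present (u v : List (Int × String × Int)) (x : Int) (c : Int)
    (r : List Int) (j : Nat) (hj : j < r.length)
    (hv : ∀ e ∈ v, ¬(e.2.1 == "start") = true → ¬(e.2.1 == "end") = true →
          0 ≤ e.2.2 ∧ e.2.2 ≠ (j : Int)) :
    (((u ++ (x, "point", (j : Int)) :: v).foldl pvStep (c, r)).2)[j]?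
      = some (c + (u.map pvDelta).sum) := by
  rw [List.foldl_append, List.foldl_cons]
  have h1 : (u.foldl pvStep (c, r)).1 = c + (u.map pvDelta).sum := pv_sweep_fst u c r
  have h2 : (u.foldl pvStep (c, r)).2.length = r.length := pv_sweep_length u c r
  have hstep : pvStep (u.foldl pvStep (c, r)) (x, "point", (j : Int))
      = ((u.foldl pvStep (c, r)).1,
         ((u.foldl pvStep (c, r)).2).set j (u.foldl pvStep (c, r)).1) := by
    simp [pvStep, PySem.List.pySetD_natCast]
  rw [hstep, pv_sweep_get_of_absent _ _ _ _ hv]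
  rw [List.getElem?_set_self (by omega), h1]

-- B's inner loop is the pair of countP's
lemma pv_inner_counts (sections : List (Int × Int)) (point : Int) (a b : Int) :
    sections.foldl (fun (c : Int × Int) s =>
        ((if s.1 ≤ point then c.1 + 1 else c.1), (if s.2 < point then c.2 + 1 else c.2))) (a, b)
      = (a + (sections.countP (fun s => s.1 ≤ point) : Int),
         b + (sections.countP (fun s => s.2 < point) : Int)) := by
  induction sections generalizing a b with
  | nil => simp
  | cons s l ih =>
      simp only [List.foldl_cons, List.countP_cons]
      rw [ih]
      split_ifs <;> simp_all <;> omega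


lemma pvKey_start (x i : Int) : pvKey (x, "start", i) = 3 * x := by simp [pvKey, pvTag]
lemma pvKey_end (x i : Int) : pvKey (x, "end", i) = 3 * x + 2 := by simp [pvKey, pvTag]
lemma pvKey_point (x i : Int) : pvKey (x, "point", i) = 3 * x + 1 := by simp [pvKey, pvTag]

-- delta-sum of a sweep prefix = #starts - #ends
lemma pv_delta_sum (u : List (Int × String × Int)) :
    (u.map pvDelta).sum
      = (u.countP (fun e => e.2.1 == "start") : Int) - (u.countP (fun e => e.2.1 == "end") : Int) := by
  induction u with
  | nil => simp
  | cons e u ih =>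
      simp only [List.map_cons, List.sum_cons, List.countP_cons, ih, pvDelta]
      by_cases h1 : (e.2.1 == "start") = true
      · have h2 : (e.2.1 == "end") = false := by
          simp only [beq_iff_eq] at h1 ⊢; simp [h1]
        simp [h1, h2]; push_cast; ring
      · simp only [Bool.not_eq_true] at h1
        by_cases h2 : (e.2.1 == "end") = true <;> simp [h1, h2] <;> push_cast <;> ring

-- the start/end event part of pvInfo, counted against a key bound
lemma pv_flat_countP_start (sections : List (Int × Int)) (K : Int) :
    (sections.flatMap (fun s => [(s.1, ("start":String), (0:Int)), (s.2, "end", 0)])).countP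
      (fun e => (e.2.1 == "start") && decide (pvKey e < K))
      = sections.countP (fun s => decide (3 * s.1 < K)) := by
  induction sections with
  | nil => rfl
  | cons s l ih =>
      simp only [List.flatMap_cons, List.cons_append, List.nil_append, List.countP_cons, ih,
        pvKey_start, pvKey_end]
      simp

lemma pv_flat_countP_end (sections : List (Int × Int)) (K : Int) :
    (sections.flatMap (fun s => [(s.1, ("start":String), (0:Int)), (s.2, "end", 0)])).countP
      (fun e => (e.2.1 == "end") && decide (pvKey e < K))
      = sections.countP (fun s => decide (3 * s.2 + 2 < K)) := by
  induction sections with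
  | nil => rfl
  | cons s l ih =>
      simp only [List.flatMap_cons, List.cons_append, List.nil_append, List.countP_cons, ih,
        pvKey_start, pvKey_end]
      simp

-- the point part contributes nothing to a predicate vanishing on point events
lemma pv_enum_countP_zero (points : List Int) (s : Int) (q : (Int × String × Int) → Bool)
    (hq : ∀ c i, q (c, "point", i) = false) :
    ((PySem.List.enumerate points s).map (fun ip => (ip.2, ("point":String), ip.1))).countP q = 0 := by
  induction points generalizing s with
  | nil => rfl
  | cons x xs ih =>
      rw [PySem.List.enumerate_cons]
      simp [List.countP_cons, hq, ih]

-- a list of events away from point-index j satisfies the absence condition of the sweep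
lemma pv_absent_of (sections : List (Int × Int)) (points : List Int) (j : Nat)
    (w : List (Int × String × Int))
    (hmem : ∀ e ∈ w, e ∈ pvInfo sections points)
    (hz : w.countP (fun e => !(e.2.1 == "start") && !(e.2.1 == "end") && (e.2.2 == (j : Int))) = 0) :
    ∀ e ∈ w, ¬(e.2.1 == "start") = true → ¬(e.2.1 == "end") = true →
      0 ≤ e.2.2 ∧ e.2.2 ≠ (j : Int) := by
  intro e he h1 h2
  rcases pvInfo_mem_elim (hmem e he) with ⟨s, _, rfl | rfl⟩ | ⟨k, hk, rfl⟩
  · simp at h1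
  · simp at h2
  · refine ⟨by positivity, ?_⟩
    intro hEq
    simp only at hEq
    have hne := List.countP_eq_zero.mp hz _ he
    simp at hne
    omega

-- the countP of point-j events over the whole event list, any j
lemma pvInfo_countP_point_all (sections : List (Int × Int)) (points : List Int) (j : Nat) :
    (pvInfo sections points).countP
      (fun e => !(e.2.1 == "start") && !(e.2.1 == "end") && (e.2.2 == (j : Int)))
      = if j < points.length then 1 else 0 := by
  unfold pvInfo
  rw [List.countP_append, pv_flat_countP_zero, pv_enum_countP]
  simp only [Nat.zero_add]
  by_cases h : j < points.length
  · rw [if_pos (by push_cast; omega), if_pos h]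
  · rw [if_neg (by push_cast; omega), if_neg h]

-- prefix counts before the point-j event in the sorted list
lemma pv_prefix_counts (sections : List (Int × Int)) (points : List Int) (j : Nat)
    (hj : j < points.length) (u v : List (Int × String × Int))
    (hL : PySem.List.sorted (pvInfo sections points) pvKey = u ++ (points[j], "point", (j : Int)) :: v) :
    (u.map pvDelta).sum
      = (sections.countP (fun s => decide (s.1 ≤ points[j])) : Int)
        - (sections.countP (fun s => decide (s.2 < points[j])) : Int) := by
  have hpair := PySem.List.sorted_pairwise (pvInfo sections points) pvKey
  rw [hL] at hpair
  obtain ⟨hpu, hpv, hib⟩ := List.pairwise_append.mp hpair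
  have hperm : (u ++ (points[j], "point", (j : Int)) :: v).Perm (pvInfo sections points) := by
    rw [← hL]; exact PySem.List.sorted_perm _ _ _
  have hu_le : ∀ a ∈ u, pvKey a ≤ 3 * points[j] + 1 := by
    intro a ha
    have := hib a ha _ (List.mem_cons_self)
    rwa [pvKey_point] at this
  have hv_ge : ∀ b ∈ v, 3 * points[j] + 1 ≤ pvKey b := by
    intro b hb
    have := (List.pairwise_cons.mp hpv).1 b hb
    rwa [pvKey_point] at this
  have hmemu : ∀ a ∈ u, a ∈ pvInfo sections points := by
    intro a ha; exact hperm.mem_iff.mp (List.mem_append.mpr (Or.inl ha))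
  -- start events of the prefix
  have hstart : u.countP (fun e => e.2.1 == "start")
      = sections.countP (fun s => decide (s.1 ≤ points[j])) := by
    have h1 : u.countP (fun e => e.2.1 == "start")
        = u.countP (fun e => (e.2.1 == "start") && decide (pvKey e < 3 * points[j] + 1)) := by
      apply List.countP_congr
      intro e he
      constructor
      · intro h
        rcases pvInfo_mem_elim (hmemu e he) with ⟨s, _, rfl | rfl⟩ | ⟨k, hk, rfl⟩
        · have := hu_le _ he
          rw [pvKey_start] at this
          simp only [h, Bool.true_and, decide_eq_true_eq, pvKey_start]
          omega
        · simp at h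
        · simp at h
      · intro h
        exact Bool.and_elim_left h
    have h2 : (u ++ (points[j], "point", (j : Int)) :: v).countP
          (fun e => (e.2.1 == "start") && decide (pvKey e < 3 * points[j] + 1))
        = u.countP (fun e => (e.2.1 == "start") && decide (pvKey e < 3 * points[j] + 1)) := by
      rw [List.countP_append, List.countP_cons]
      have hz : v.countP (fun e => (e.2.1 == "start") && decide (pvKey e < 3 * points[j] + 1)) = 0 := by
        apply List.countP_eq_zero.mpr
        intro e he hc
        have := hv_ge e he
        have hlt := Bool.and_elim_right hc
        rw [decide_eq_true_eq] at hlt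
        omega
      simp [hz]
      intro a t b hmem' htag
      have := hv_ge _ hmem'
      omega
    have h4 : (pvInfo sections points).countP
          (fun e => (e.2.1 == "start") && decide (pvKey e < 3 * points[j] + 1))
        = sections.countP (fun s => decide (3 * s.1 < 3 * points[j] + 1)) := by
      unfold pvInfo
      rw [List.countP_append, pv_flat_countP_start, pv_enum_countP_zero _ _ _ (by intro c i; simp)]
      simp
    rw [h1, ← h2, hperm.countP_eq, h4]
    apply List.countP_congr
    intro s _
    simp only [decide_eq_true_eq]
    omega
  -- end events of the prefix
  have hend : u.countP (fun e => e.2.1 == "end")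
      = sections.countP (fun s => decide (s.2 < points[j])) := by
    have h1 : u.countP (fun e => e.2.1 == "end")
        = u.countP (fun e => (e.2.1 == "end") && decide (pvKey e < 3 * points[j] + 1)) := by
      apply List.countP_congr
      intro e he
      constructor
      · intro h
        rcases pvInfo_mem_elim (hmemu e he) with ⟨s, _, rfl | rfl⟩ | ⟨k, hk, rfl⟩
        · simp at h
        · have := hu_le _ he
          rw [pvKey_end] at this
          simp only [h, Bool.true_and, decide_eq_true_eq, pvKey_end]
          omega
        · simp at h
      · intro h
        exact Bool.and_elim_left h
    have h2 : (u ++ (points[j], "point", (j : Int)) :: v).countP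
          (fun e => (e.2.1 == "end") && decide (pvKey e < 3 * points[j] + 1))
        = u.countP (fun e => (e.2.1 == "end") && decide (pvKey e < 3 * points[j] + 1)) := by
      rw [List.countP_append, List.countP_cons]
      have hz : v.countP (fun e => (e.2.1 == "end") && decide (pvKey e < 3 * points[j] + 1)) = 0 := by
        apply List.countP_eq_zero.mpr
        intro e he hc
        have := hv_ge e he
        have hlt := Bool.and_elim_right hc
        rw [decide_eq_true_eq] at hlt
        omega
      simp [hz]
      intro a t b hmem' htag
      have := hv_ge _ hmem'
      omega
    have h4 : (pvInfo sections points).countP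
          (fun e => (e.2.1 == "end") && decide (pvKey e < 3 * points[j] + 1))
        = sections.countP (fun s => decide (3 * s.2 + 2 < 3 * points[j] + 1)) := by
      unfold pvInfo
      rw [List.countP_append, pv_flat_countP_end, pv_enum_countP_zero _ _ _ (by intro c i; simp)]
      simp
    rw [h1, ← h2, hperm.countP_eq, h4]
    apply List.countP_congr
    intro s _
    simp only [decide_eq_true_eq]
    omega
  rw [pv_delta_sum, hstart, hend]

-- ===== VERDICT (by name: the statement is the Claim_ definition above) =====
theorem points_counter_spec : Claim_equal_points_counter := by
  intro p sections points _ hpre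
  unfold Spec_points_counter
  -- A in normal form: sweep of the sorted event list, single Int key
  have hA : points_counter p sections points
      = ((PySem.List.sorted (pvInfo sections points) pvKey).foldl pvStep
          (0, List.replicate p.toNat 0)).2 := by
    simp only [points_counter]
    rw [PySem.List.foldl_append_eq_flatMap, List.nil_append, pv_sorted2_eq_sorted,
      PySem.List.pyRepeat_singleton]
    rfl
  -- B in normal form: per-point countP difference, then zero padding
  have hB : points_counter_alt p sections points
      = points.map (fun pt => ((sections.countP (fun s => decide (s.1 ≤ pt)) : Int)
            - (sections.countP (fun s => decide (s.2 < pt)) : Int)))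
          ++ List.replicate (p - (points.length : Int)).toNat 0 := by
    simp only [points_counter_alt]
    rw [PySem.List.foldl_append_singleton_eq_map, List.nil_append, PySem.List.pyRepeat_singleton]
    congr 1
    apply List.map_congr_left
    intro pt _
    rw [pv_inner_counts]
    simp
  rw [hA, hB]
  apply List.ext_getElem?
  intro j
  by_cases hj : j < points.length
  · -- a point index: A writes the sweep counter, B the countP difference
    have hne : points ≠ [] := by intro h; rw [h] at hj; simp at hj
    have hp : (points.length : Int) ≤ p := hpre.resolve_right hne
    have hjp : j < p.toNat := by omega
    have hmemL : (points[j], "point", (j : Int)) ∈ PySem.List.sorted (pvInfo sections points) pvKey :=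
      (PySem.List.sorted_perm _ _ _).mem_iff.mpr (pvPoint_mem_info hj)
    obtain ⟨u, v, hL⟩ := List.append_of_mem hmemL
    have hperm : (u ++ (points[j], "point", (j : Int)) :: v).Perm (pvInfo sections points) := by
      rw [← hL]; exact PySem.List.sorted_perm _ _ _
    have hcnt : (u ++ (points[j], "point", (j : Int)) :: v).countP
        (fun e => !(e.2.1 == "start") && !(e.2.1 == "end") && (e.2.2 == (j : Int))) = 1 := by
      rw [hperm.countP_eq, pvInfo_countP_point_all, if_pos hj]
    rw [List.countP_append, List.countP_cons] at hcnt
    have hpe : (!((("point":String)) == "start") && !((("point":String)) == "end")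
        && (((j : Int)) == (j : Int))) = true := by simp
    simp only [hpe, if_pos] at hcnt
    have hzv : v.countP
        (fun e => !(e.2.1 == "start") && !(e.2.1 == "end") && (e.2.2 == (j : Int))) = 0 := by omega
    have habs := pv_absent_of sections points j v
      (fun e he => hperm.mem_iff.mp (List.mem_append.mpr (Or.inr (List.mem_cons_of_mem _ he)))) hzv
    rw [hL, pv_sweep_get_of_present u v _ 0 _ j (by simpa using hjp) habs]
    rw [List.getElem?_append_left (by simpa using hj), List.getElem?_map,
      List.getElem?_eq_getElem hj]
    simp only [Option.map_some]
    rw [pv_prefix_counts sections points j hj u v hL]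
    simp
  · -- not a point index: A keeps the initial zero, B reads the padding
    have habs := pv_absent_of sections points j
      (PySem.List.sorted (pvInfo sections points) pvKey)
      (fun e he => (PySem.List.sorted_perm _ _ _).mem_iff.mp he)
      (by rw [(PySem.List.sorted_perm _ _ _).countP_eq, pvInfo_countP_point_all, if_neg hj])
    rw [pv_sweep_get_of_absent _ _ _ _ habs, List.getElem?_replicate,
      List.getElem?_append_right (by simpa using Nat.le_of_not_lt hj), List.getElem?_replicate]
    simp only [List.length_map]
    rcases hpre with hp | hp
    · split_ifs <;> first | rfl | omega
    · subst hp
      simp only [List.length_nil, Nat.sub_zero]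
      split_ifs <;> first | rfl | (exfalso; omega)
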